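-- pv_equiv track=rewrite | github.com/garigerahulkarunya/E3S1_AI | rabbit_leap_bfs_dfs.py | bfs
-- ===== SOURCE A (Python) =====
-- from collections import deque
--
-- def is_goal(state):
--     if state == '<<<_>>>':
--         return True
--     else:
--         return False
--
-- def get_next_states(state):
--     next_states = []
--     state = list(state)
--     for i in range(7):
--         if state[i] == '>':
--             # move right
--             if i + 1 < 7 and state[i + 1] == '_':
--                 temp = state[:]
--                 temp[i], temp[i + 1] = temp[i + 1], temp[i]
--                 next_states.append(''.join(temp))
--             # jump over one rabbit
--             if i + 2 < 7 and state[i + 1] in ['<', '>'] and state[i + 2] == '_':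
--                 temp = state[:]
--                 temp[i], temp[i + 2] = temp[i + 2], temp[i]
--                 next_states.append(''.join(temp))
--         elif state[i] == '<':
--             # move left
--             if i - 1 >= 0 and state[i - 1] == '_':
--                 temp = state[:]
--                 temp[i], temp[i - 1] = temp[i - 1], temp[i]
--                 next_states.append(''.join(temp))
--             # jump over one rabbit
--             if i - 2 >= 0 and state[i - 1] in ['<', '>'] and state[i - 2] == '_':
--                 temp = state[:]
--                 temp[i], temp[i - 2] = temp[i - 2], temp[i]
--                 next_states.append(''.join(temp))
--     return next_states
--
-- def bfs(start):
--     queue = deque()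
--     queue.append((start, [start]))
--     visited = set()
--
--     while queue:
--         current, path = queue.popleft()
--
--         if is_goal(current):
--             return path
--
--         for next_state in get_next_states(current):
--             if next_state not in visited:
--                 visited.add(next_state)
--                 queue.append((next_state, path + [next_state]))
--
--     return None
-- ===== SOURCE B (Python) =====
-- from collections import deque
--
-- def is_goal(state):
--     return state == '<<<_>>>'
--
-- def get_next_states(state):
--     next_states = []
--     state = list(state)
--     for i in range(7):
--         if state[i] == '>':
--             if i + 1 < 7 and state[i + 1] == '_':
--                 temp = state[:]
--                 temp[i], temp[i + 1] = temp[i + 1], temp[i]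
--                 next_states.append(''.join(temp))
--             if i + 2 < 7 and state[i + 1] in ['<', '>'] and state[i + 2] == '_':
--                 temp = state[:]
--                 temp[i], temp[i + 2] = temp[i + 2], temp[i]
--                 next_states.append(''.join(temp))
--         elif state[i] == '<':
--             if i - 1 >= 0 and state[i - 1] == '_':
--                 temp = state[:]
--                 temp[i], temp[i - 1] = temp[i - 1], temp[i]
--                 next_states.append(''.join(temp))
--             if i - 2 >= 0 and state[i - 1] in ['<', '>'] and state[i - 2] == '_':
--                 temp = state[:]
--                 temp[i], temp[i - 2] = temp[i - 2], temp[i]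
--                 next_states.append(''.join(temp))
--     return next_states
--
-- def bfs(start):
--     # queue holds bare states; parent maps each first-discovered state to its predecessor
--     parent = {}
--     queue = deque([start])
--     visited = set()
--     while queue:
--         current = queue.popleft()
--         if is_goal(current):
--             path = [current]
--             while path[-1] != start:
--                 path.append(parent[path[-1]])
--             path.reverse()
--             return path
--         for nxt in get_next_states(current):
--             if nxt not in visited:
--                 visited.add(nxt)
--                 parent[nxt] = current
--                 queue.append(nxt)
--     return None
-- ===== Notes on version B (the rewrite author's own statement) =====
-- stated objective: alternative
-- what changed: B's BFS queue holds bare states and a parent dictionary records each state's first-discovery predecessor; the path is reconstructed once by walking parents back from the goal, instead of copying an ever-growing path list into every queue entry.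
import Mathlib
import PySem

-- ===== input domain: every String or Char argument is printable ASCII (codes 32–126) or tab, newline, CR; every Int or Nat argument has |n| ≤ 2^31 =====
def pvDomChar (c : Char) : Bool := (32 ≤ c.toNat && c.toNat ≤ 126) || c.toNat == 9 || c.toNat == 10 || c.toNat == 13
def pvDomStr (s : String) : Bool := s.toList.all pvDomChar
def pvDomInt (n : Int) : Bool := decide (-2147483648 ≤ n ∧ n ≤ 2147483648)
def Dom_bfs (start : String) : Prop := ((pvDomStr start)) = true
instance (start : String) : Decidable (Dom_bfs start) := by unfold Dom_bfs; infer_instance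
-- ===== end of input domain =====

-- B replaces A's per-queue-entry path copies by a parent dictionary and reconstructs the
-- path only once, when the goal is dequeued (objective: alternative decomposition).

-- ===== PORT A =====
def isGoal (s : String) : Bool := s == "<<<_>>>"

-- temp[i], temp[j] = temp[j], temp[i] (both indices are in range under Pre_)
def swapAt (st : List Char) (i j : Nat) : List Char :=
  (st.set i (st.getD j ' ')).set j (st.getD i ' ')

-- the appends the Python loop body performs for one index i, in the same order
def movesAt (st : List Char) (i : Nat) : List String :=
  if st.getD i ' ' == '>' then
    (if i + 1 < 7 && (st.getD (i+1) ' ' == '_') then [String.ofList (swapAt st i (i+1))] else []) ++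
    (if i + 2 < 7 && (st.getD (i+1) ' ' == '<' || st.getD (i+1) ' ' == '>')
        && (st.getD (i+2) ' ' == '_') then [String.ofList (swapAt st i (i+2))] else [])
  else if st.getD i ' ' == '<' then
    (if 1 ≤ i && (st.getD (i-1) ' ' == '_') then [String.ofList (swapAt st i (i-1))] else []) ++
    (if 2 ≤ i && (st.getD (i-1) ' ' == '<' || st.getD (i-1) ' ' == '>')
        && (st.getD (i-2) ' ' == '_') then [String.ofList (swapAt st i (i-2))] else [])
  else []

def getNextStates (state : String) : List String :=
  (List.range 7).foldl (fun acc i => acc ++ movesAt state.toList i) []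

-- body of A's inner 'for next_state in get_next_states(current)' loop
def stepA (path : List String) (acc : List (String × List String) × PySem.Set String)
    (n : String) : List (String × List String) × PySem.Set String :=
  if PySem.Set.contains acc.2 n then acc
  else (acc.1 ++ [(n, path ++ [n])], PySem.Set.add acc.2 n)

-- A's while loop; the fuel guard only makes the recursion total (6000 > 7! + 2 exceeds the
-- number of iterations possible: only the first 7 characters are ever permuted)
def loopA : Nat → List (String × List String) → PySem.Set String → Option (List String)
  | 0, _, _ => none
  | _ + 1, [], _ => none
  | fuel + 1, (current, path) :: rest, visited =>
    if isGoal current then some path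
    else
      let st := (getNextStates current).foldl (stepA path) (rest, visited)
      loopA fuel st.1 st.2

def bfs (start : String) : Option (List String) :=
  loopA 6000 [(start, [start])] PySem.Set.empty

-- ===== PORT B =====
-- B's reconstruction loop: path.append(parent[path[-1]]) until path[-1] == start
def rebuild : Nat → PySem.Dict String String → String → List String → List String
  | 0, _, _, path => path
  | fuel + 1, parent, start, path =>
    match path.getLast? with
    | none => path
    | some last =>
      if last == start then path
      else
        match parent.get? last with
        | none => path
        | some c => rebuild fuel parent start (path ++ [c])

-- body of B's inner loop: mark visited, record the parent, enqueue the bare state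
def stepB (cur : String) (acc : List String × PySem.Set String × PySem.Dict String String)
    (n : String) : List String × PySem.Set String × PySem.Dict String String :=
  if PySem.Set.contains acc.2.1 n then acc
  else (acc.1 ++ [n], PySem.Set.add acc.2.1 n, acc.2.2.insert n cur)

def loopB (start : String) : Nat → List String → PySem.Set String → PySem.Dict String String →
    Option (List String)
  | 0, _, _, _ => none
  | _ + 1, [], _, _ => none
  | fuel + 1, current :: rest, visited, parent =>
    if isGoal current then some ((rebuild (parent.size + 1) parent start [current]).reverse)
    else
      let st := (getNextStates current).foldl (stepB current) (rest, visited, parent)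
      loopB start fuel st.1 st.2.1 st.2.2

def bfs_alt (start : String) : Option (List String) :=
  loopB start 6000 [start] PySem.Set.empty PySem.Dict.empty

-- ===== PRECONDITION & SPEC =====
-- Pre_ excludes strings shorter than 7 characters, on which the Python A raises IndexError
-- (state[i] inside get_next_states); it excludes nothing A returns on.
def Pre_bfs (start : String) : Prop := 7 ≤ start.toList.length
instance (start : String) : Decidable (Pre_bfs start) := by unfold Pre_bfs; infer_instance

def pvWitness_bfs : String := ">>>_<<<"

def Spec_bfs (start : String) (out : Option (List String)) : Prop := out = bfs_alt start
instance (start : String) (out : Option (List String)) : Decidable (Spec_bfs start out) := by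
  unfold Spec_bfs; infer_instance

-- ===== CLAIM (what is proved, stated in full; the proofs are below) =====
def Claim_equal_bfs : Prop := ∀ (start : String), Dom_bfs start → Pre_bfs start → Spec_bfs start (bfs start)

-- ===== LEMMAS AND PROOFS =====

-- p is the path A stores for state s: it runs start → … → s along recorded parents
inductive Chain (pd : PySem.Dict String String) (start : String) : String → List String → Prop
  | base : Chain pd start start [start]
  | step {s c : String} {p : List String} : s ≠ start → pd.get? s = some c →
      Chain pd start c p → Chain pd start s (p ++ [s])

lemma chain_ne_nil {pd : PySem.Dict String String} {start s : String} {p : List String}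
    (h : Chain pd start s p) : p ≠ [] := by
  cases h <;> simp

lemma chain_subset {pd : PySem.Dict String String} {start s : String} {p : List String}
    (h : Chain pd start s p) : ∀ x ∈ p, x = start ∨ x ∈ pd.keys := by
  induction h with
  | base => intro x hx; rw [List.mem_singleton] at hx; exact Or.inl hx
  | @step s' c' p' hne hget hc ih =>
    intro x hx
    rcases List.mem_append.mp hx with h1 | h2
    · exact ih x h1
    · rw [List.mem_singleton] at h2; subst h2
      right
      rw [← PySem.Dict.contains_iff_mem_keys, PySem.Dict.contains_eq_isSome_get?, hget]
      rfl

lemma chain_insert {pd : PySem.Dict String String} {start s : String} {p : List String}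
    {v : PySem.Set String} {n c0 : String}
    (h : Chain pd start s p) (hmem : ∀ x ∈ p, x = start ∨ x ∈ v) (hn : n ∉ v) :
    Chain (pd.insert n c0) start s p := by
  induction h with
  | base => exact Chain.base
  | @step s' c' p' hne hget hc ih =>
    have hs' : s' ∈ v := by
      rcases hmem s' (List.mem_append.mpr (Or.inr (List.mem_singleton.mpr rfl))) with h | h
      · exact absurd h hne
      · exact h
    have hmem' : ∀ x ∈ p', x = start ∨ x ∈ v := fun x hx =>
      hmem x (List.mem_append.mpr (Or.inl hx))
    refine Chain.step hne ?_ (ih hmem')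
    have hne2 : s' ≠ n := fun he => hn (by rw [← he]; exact hs')
    rw [PySem.Dict.get?_insert_of_ne _ c0 hne2]
    exact hget

lemma chain_length_le {pd : PySem.Dict String String} {start s : String} {p : List String}
    (h : Chain pd start s p) (hnd : p.Nodup) : p.length ≤ pd.size + 1 := by
  have hsub : p ⊆ start :: pd.keys := by
    intro x hx
    rcases chain_subset h x hx with h1 | h1
    · exact h1 ▸ List.mem_cons_self
    · exact List.mem_cons_of_mem _ h1
  have := (hnd.subperm hsub).length_le
  simpa [PySem.Dict.keys, PySem.Dict.size] using this

lemma rebuild_eq {pd : PySem.Dict String String} {start s : String} {p : List String}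
    (hc : Chain pd start s p) :
    ∀ (fuel : Nat) (pref : List String), p.length ≤ fuel + 1 →
      rebuild fuel pd start (pref ++ [s]) = pref ++ p.reverse := by
  induction hc with
  | base =>
    intro fuel pref _
    cases fuel with
    | zero => simp [rebuild]
    | succ f => simp [rebuild]
  | @step s' c' p' hne hget hc ih =>
    intro fuel pref hlen
    cases fuel with
    | zero =>
      exfalso
      have : p'.length = 0 := by simpa using hlen
      exact chain_ne_nil hc (List.length_eq_zero_iff.mp this)
    | succ f =>
      have hlen' : p'.length ≤ f + 1 := by simpa using hlen
      have hbeq : (s' == start) = false := by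
        simp [hne]
      simp only [rebuild, List.getLast?_concat, hbeq, hget]
      rw [ih f (pref ++ [s']) hlen']
      simp

-- the invariant each normal queue entry satisfies
def GoodP (start : String) (v : PySem.Set String) (pd : PySem.Dict String String)
    (s : String) (p : List String) : Prop :=
  Chain pd start s p ∧ p.Nodup ∧ ∀ x ∈ p, x = start ∨ x ∈ v

-- a re-discovered start entry: harmless because all its successors are (or will be) visited
def DegP (start : String) (v : PySem.Set String) (ns : List String) (s : String) : Prop :=
  s = start ∧ ∀ m ∈ getNextStates start, m ∈ v ∨ m ∈ ns

lemma mem_of_contains {v : PySem.Set String} {n : String}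
    (h : PySem.Set.contains v n = true) : n ∈ v := by
  simpa [PySem.Set.contains] using h

lemma not_mem_of_not_contains {v : PySem.Set String} {n : String}
    (h : PySem.Set.contains v n = false) : n ∉ v := by
  simp [PySem.Set.contains] at h; exact h

lemma foldA_noop (path : List String) :
    ∀ (ns : List String) (qa : List (String × List String)) (v : PySem.Set String),
      (∀ n ∈ ns, n ∈ v) → ns.foldl (stepA path) (qa, v) = (qa, v) := by
  intro ns
  induction ns with
  | nil => intro qa v _; rfl
  | cons n ns ih =>
    intro qa v h
    have hc : PySem.Set.contains v n = true := by
      simpa [PySem.Set.contains] using h n List.mem_cons_self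
    simp only [List.foldl_cons, stepA, hc, if_true]
    exact ih qa v (fun m hm => h m (List.mem_cons_of_mem _ hm))

lemma foldB_noop (cur : String) :
    ∀ (ns : List String) (qb : List String) (v : PySem.Set String)
      (pd : PySem.Dict String String),
      (∀ n ∈ ns, n ∈ v) → ns.foldl (stepB cur) (qb, v, pd) = (qb, v, pd) := by
  intro ns
  induction ns with
  | nil => intro qb v pd _; rfl
  | cons n ns ih =>
    intro qb v pd h
    have hc : PySem.Set.contains v n = true := by
      simpa [PySem.Set.contains] using h n List.mem_cons_self
    simp only [List.foldl_cons, stepB, hc, if_true]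
    exact ih qb v pd (fun m hm => h m (List.mem_cons_of_mem _ hm))

lemma fold_spec (start : String) :
    ∀ (ns : List String) (qa : List (String × List String)) (v : PySem.Set String)
      (pd : PySem.Dict String String) (cur : String) (path : List String),
      pd.keys.Nodup →
      (∀ s p, (s, p) ∈ qa → GoodP start v pd s p ∨ DegP start v ns s) →
      Chain pd start cur path → path.Nodup → (∀ x ∈ path, x = start ∨ x ∈ v) →
      (∀ m ∈ getNextStates start, m ∈ v ∨ m ∈ ns) →
      (ns.foldl (stepB cur) (qa.map Prod.fst, v, pd)).1
          = ((ns.foldl (stepA path) (qa, v)).1).map Prod.fst ∧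
      (ns.foldl (stepB cur) (qa.map Prod.fst, v, pd)).2.1 = (ns.foldl (stepA path) (qa, v)).2 ∧
      ((ns.foldl (stepB cur) (qa.map Prod.fst, v, pd)).2.2).keys.Nodup ∧
      (∀ s p, (s, p) ∈ (ns.foldl (stepA path) (qa, v)).1 →
        GoodP start (ns.foldl (stepA path) (qa, v)).2
          (ns.foldl (stepB cur) (qa.map Prod.fst, v, pd)).2.2 s p ∨
        DegP start (ns.foldl (stepA path) (qa, v)).2 [] s) ∧
      (∀ x ∈ v, x ∈ (ns.foldl (stepA path) (qa, v)).2) ∧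
      (∀ n ∈ ns, n ∈ (ns.foldl (stepA path) (qa, v)).2) := by
  intro ns
  induction ns with
  | nil =>
    intro qa v pd cur path hk hq _hc _hnd _hm _hs
    exact ⟨rfl, rfl, hk, fun s p hp => hq s p hp, fun x hx => hx, by simp⟩
  | cons n ns ih =>
    intro qa v pd cur path hk hq hc hnd hm hs
    by_cases hv : PySem.Set.contains v n = true
    · have hnv : n ∈ v := mem_of_contains hv
      simp only [List.foldl_cons, stepA, stepB, hv, if_true]
      have hq' : ∀ s p, (s, p) ∈ qa → GoodP start v pd s p ∨ DegP start v ns s := by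
        intro s p hp
        rcases hq s p hp with h | ⟨h1, h2⟩
        · exact Or.inl h
        · refine Or.inr ⟨h1, fun m hmm => ?_⟩
          rcases h2 m hmm with h | h
          · exact Or.inl h
          · rcases List.mem_cons.mp h with h | h
            · exact Or.inl (h ▸ hnv)
            · exact Or.inr h
      have hs' : ∀ m ∈ getNextStates start, m ∈ v ∨ m ∈ ns := by
        intro m hmm
        rcases hs m hmm with h | h
        · exact Or.inl h
        · rcases List.mem_cons.mp h with h | h
          · exact Or.inl (h ▸ hnv)
          · exact Or.inr h
      have H := ih qa v pd cur path hk hq' hc hnd hm hs'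
      refine ⟨H.1, H.2.1, H.2.2.1, H.2.2.2.1, H.2.2.2.2.1, ?_⟩
      intro m hmm
      rcases List.mem_cons.mp hmm with h | h
      · exact h ▸ H.2.2.2.2.1 n hnv
      · exact H.2.2.2.2.2 m h
    · have hv' : PySem.Set.contains v n = false := by
        cases h : PySem.Set.contains v n
        · rfl
        · exact absurd h hv
      have hnv : n ∉ v := not_mem_of_not_contains hv'
      simp only [List.foldl_cons, stepA, stepB, hv', Bool.false_eq_true, if_false]
      have hmapq : (qa ++ [(n, path ++ [n])]).map Prod.fst = qa.map Prod.fst ++ [n] := by simp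
      have hk' : (pd.insert n cur).keys.Nodup := PySem.Dict.nodup_keys_insert pd n cur hk
      have hmono : ∀ x ∈ v, x ∈ PySem.Set.add v n := fun x hx =>
        (PySem.Set.mem_add v n x).mpr (Or.inl hx)
      have hnadd : n ∈ PySem.Set.add v n := (PySem.Set.mem_add v n n).mpr (Or.inr rfl)
      have hc' : Chain (pd.insert n cur) start cur path := chain_insert hc hm hnv
      have hm' : ∀ x ∈ path, x = start ∨ x ∈ PySem.Set.add v n := fun x hx =>
        (hm x hx).imp id (hmono x)
      have hq' : ∀ s p, (s, p) ∈ qa ++ [(n, path ++ [n])] →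
          GoodP start (PySem.Set.add v n) (pd.insert n cur) s p ∨
          DegP start (PySem.Set.add v n) ns s := by
        intro s p hp
        rcases List.mem_append.mp hp with hp | hp
        · rcases hq s p hp with ⟨hch, hpn, hpm⟩ | ⟨h1, h2⟩
          · exact Or.inl ⟨chain_insert hch hpm hnv, hpn,
              fun x hx => (hpm x hx).imp id (hmono x)⟩
          · refine Or.inr ⟨h1, fun m hmm => ?_⟩
            rcases h2 m hmm with h | h
            · exact Or.inl (hmono m h)
            · rcases List.mem_cons.mp h with h | h
              · exact Or.inl (h ▸ hnadd)
              · exact Or.inr h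
        · rw [List.mem_singleton, Prod.mk.injEq] at hp
          obtain ⟨rfl, rfl⟩ := hp
          by_cases hstart : s = start
          · refine Or.inr ⟨hstart, fun m hmm => ?_⟩
            rcases hs m hmm with h | h
            · exact Or.inl (hmono m h)
            · rcases List.mem_cons.mp h with h | h
              · exact Or.inl (h ▸ hnadd)
              · exact Or.inr h
          · refine Or.inl ⟨Chain.step hstart (PySem.Dict.get?_insert_self pd s cur) hc', ?_, ?_⟩
            · have hnp : s ∉ path := fun hin => by
                rcases hm s hin with h | h
                · exact hstart h
                · exact hnv h
              have hgoal : ∀ a ∈ path, ¬a = s := fun a ha has => hnp (has ▸ ha)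
              simp [List.nodup_append, hnd]
              intro a ha has
              exact hnp (has ▸ ha)
            · intro x hx
              rcases List.mem_append.mp hx with h | h
              · exact hm' x h
              · rw [List.mem_singleton] at h
                exact Or.inr (h ▸ hnadd)
      have hs' : ∀ m ∈ getNextStates start, m ∈ PySem.Set.add v n ∨ m ∈ ns := by
        intro m hmm
        rcases hs m hmm with h | h
        · exact Or.inl (hmono m h)
        · rcases List.mem_cons.mp h with h | h
          · exact Or.inl (h ▸ hnadd)
          · exact Or.inr h
      have H := ih (qa ++ [(n, path ++ [n])]) (PySem.Set.add v n) (pd.insert n cur)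
        cur path hk' hq' hc' hnd hm' hs'
      rw [hmapq] at H
      refine ⟨H.1, H.2.1, H.2.2.1, H.2.2.2.1, ?_, ?_⟩
      · exact fun x hx => H.2.2.2.2.1 x (hmono x hx)
      · intro m hmm
        rcases List.mem_cons.mp hmm with h | h
        · exact h ▸ H.2.2.2.2.1 n hnadd
        · exact H.2.2.2.2.2 m h

lemma loop_spec (start : String) :
    ∀ (fuel : Nat) (qa : List (String × List String)) (v : PySem.Set String)
      (pd : PySem.Dict String String),
      pd.keys.Nodup →
      (∀ s p, (s, p) ∈ qa → GoodP start v pd s p ∨ DegP start v [] s) →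
      ((qa = [(start, [start])] ∧ v = PySem.Set.empty ∧ pd = PySem.Dict.empty) ∨
        (isGoal start = false ∧ ∀ m ∈ getNextStates start, m ∈ v)) →
      loopA fuel qa v = loopB start fuel (qa.map Prod.fst) v pd := by
  intro fuel
  induction fuel with
  | zero => intro qa v pd _ _ _; rfl
  | succ fuel ih =>
    intro qa v pd hk hq hinit
    match qa with
    | [] => rfl
    | (cur, path) :: rest =>
      simp only [List.map_cons]
      by_cases hg : isGoal cur = true
      · -- goal dequeued: A returns the stored path, B rebuilds it from the parent dict
        rcases hinit with ⟨hqa, hv, hpd⟩ | ⟨hgs, _⟩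
        · -- initial state: cur = start, path = [start]
          rw [List.cons.injEq] at hqa
          obtain ⟨hpair, hrest⟩ := hqa
          rw [Prod.mk.injEq] at hpair
          obtain ⟨rfl, rfl⟩ := hpair
          subst hv hpd hrest
          simp [loopA, loopB, hg, rebuild]
        · -- expanded state: the entry is Good (a Deg entry would force cur = start, but
          -- isGoal start = false ≠ isGoal cur)
          rcases hq cur path List.mem_cons_self with ⟨hch, hpn, _⟩ | ⟨h1, _⟩
          · have hlen : path.length ≤ pd.size + 1 := chain_length_le hch hpn
            have hreb : rebuild (pd.size + 1) pd start ([] ++ [cur]) = [] ++ path.reverse :=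
              rebuild_eq hch (pd.size + 1) [] (by omega)
            simp only [List.nil_append] at hreb
            simp [loopA, loopB, hg, hreb]
          · rw [h1] at hg
            rw [hgs] at hg
            exact absurd hg (by simp)
      · -- not the goal: expand
        have hg' : isGoal cur = false := by
          cases h : isGoal cur
          · rfl
          · exact absurd h hg
        rcases hinit with ⟨hqa, hv, hpd⟩ | ⟨hgs, hvs⟩
        · -- initial state: expand start itself
          rw [List.cons.injEq] at hqa
          obtain ⟨hpair, hrest⟩ := hqa
          rw [Prod.mk.injEq] at hpair
          obtain ⟨rfl, rfl⟩ := hpair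
          subst hv hpd hrest
          have H := fold_spec cur (getNextStates cur) [] PySem.Set.empty PySem.Dict.empty
            cur [cur] PySem.Dict.nodup_keys_empty (by simp) Chain.base (by simp)
            (by simp) (fun m hmm => Or.inr hmm)
          simp only [List.map_nil] at H
          simp only [loopA, loopB, hg', Bool.false_eq_true, if_false, List.map_nil]
          rw [H.1, H.2.1]
          exact ih _ _ _ H.2.2.1 H.2.2.2.1
            (Or.inr ⟨hg', fun m hmm => H.2.2.2.2.2 m hmm⟩)
        · -- expanded state
          rcases hq cur path List.mem_cons_self with ⟨hch, hpn, hpm⟩ | ⟨h1, _⟩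
          · -- Good entry: run the coupled fold
            have hq' : ∀ s p, (s, p) ∈ rest →
                GoodP start v pd s p ∨ DegP start v (getNextStates cur) s := by
              intro s p hp
              rcases hq s p (List.mem_cons_of_mem _ hp) with h | ⟨ha, hb⟩
              · exact Or.inl h
              · exact Or.inr ⟨ha, fun m hmm => Or.inl ((hb m hmm).resolve_right (by simp))⟩
            have H := fold_spec start (getNextStates cur) rest v pd cur path hk hq'
              hch hpn hpm (fun m hmm => Or.inl (hvs m hmm))
            simp only [loopA, loopB, hg', Bool.false_eq_true, if_false]
            rw [H.1, H.2.1]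
            exact ih _ _ _ H.2.2.1 H.2.2.2.1
              (Or.inr ⟨hgs, fun m hmm => H.2.2.2.2.1 m (hvs m hmm)⟩)
          · -- Deg entry: cur = start and every successor is already visited → no-op fold
            subst h1
            have hvv : ∀ m ∈ getNextStates cur, m ∈ v := hvs
            have hA := foldA_noop path (getNextStates cur) rest v hvv
            have hB := foldB_noop cur (getNextStates cur) (rest.map Prod.fst) v pd hvv
            simp only [loopA, loopB, hg', Bool.false_eq_true, if_false]
            rw [hA, hB]
            exact ih _ _ _ hk
              (fun s p hp => hq s p (List.mem_cons_of_mem _ hp)) (Or.inr ⟨hgs, hvs⟩)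

-- ===== VERDICT (by name: the statement is the Claim_ definition above) =====
theorem bfs_spec : Claim_equal_bfs := by
  intro start _ _
  show bfs start = bfs_alt start
  unfold bfs bfs_alt
  have H := loop_spec start 6000 [(start, [start])] PySem.Set.empty PySem.Dict.empty
    PySem.Dict.nodup_keys_empty
    (by
      intro s p hp
      rw [List.mem_singleton, Prod.mk.injEq] at hp
      obtain ⟨rfl, rfl⟩ := hp
      exact Or.inl ⟨Chain.base, by simp, by simp⟩)
    (Or.inl ⟨rfl, rfl, rfl⟩)
  simpa using H
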